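-- pv_equiv track=rewrite | github.com/Seori15/algorithm | python/Programmers/햄버거 만들기.py | solution
-- ===== SOURCE A (Python) =====
-- def solution(ingredient, k, s):
--     answer = 0
--     n = len(ingredient)
--
--     # [1] 1<<n 은 길이가 n인 리스트에서 모든 조합 경우의 수를 고려하게 해준다.
--     for num in range(1, 1<<n):
--         k_sum = 0
--         s_sum = 0
--         # [2] 현재 반복문에서 선택된 재료들의 합을 구한다.
--         for idx in range(0, n):
--             if (num & (1 << idx)) != 0:
--                 k_sum += ingredient[idx][0]
--                 s_sum += ingredient[idx][1]
--         if k_sum <= k and s_sum >= s: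
--             answer += 1
--     return answer
-- ===== SOURCE B (Python) =====
-- def solution(ingredient, k, s):
--     # Build all achievable (k_sum, s_sum) subset sums by doubling, then count.
--     sums = [(0, 0)]
--     for a, b in ingredient:
--         sums += [(x + a, y + b) for x, y in sums]
--     good = sum(1 for x, y in sums if x <= k and y >= s)
--     return good - (1 if 0 <= k and 0 >= s else 0)
-- ===== Notes on version B (the rewrite author's own statement) =====
-- stated objective: alternative
-- what changed: Replaces the bitmask enumeration with its O(n) inner re-summation loop by a subset-sums doubling list (each subset's pair sum is computed once, incrementally), counting the good pairs and subtracting the empty subset.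
import Mathlib
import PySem

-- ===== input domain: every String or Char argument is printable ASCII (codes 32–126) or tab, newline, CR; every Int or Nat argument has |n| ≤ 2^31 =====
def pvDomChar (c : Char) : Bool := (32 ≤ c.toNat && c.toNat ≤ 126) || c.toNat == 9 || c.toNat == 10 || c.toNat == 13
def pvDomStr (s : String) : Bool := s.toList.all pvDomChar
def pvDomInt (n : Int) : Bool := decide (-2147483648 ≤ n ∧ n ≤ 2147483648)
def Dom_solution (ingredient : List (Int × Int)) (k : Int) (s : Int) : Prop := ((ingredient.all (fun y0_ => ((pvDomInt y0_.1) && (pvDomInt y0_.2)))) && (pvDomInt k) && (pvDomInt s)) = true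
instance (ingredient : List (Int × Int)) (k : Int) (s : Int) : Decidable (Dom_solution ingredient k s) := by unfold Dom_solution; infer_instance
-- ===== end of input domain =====

-- B replaces A's bitmask enumeration (re-summing each subset with an inner loop) by the
-- subset-sums doubling list, computing each subset's pair sum once (at the price of
-- keeping all 2^n pair sums in memory).

-- ===== PORT A =====
-- Literal port of A: outer loop over range(1, 1<<n), inner loop over range(0, n) testing
-- bit idx of num.  'idx.toNat' is exact here: idx comes from pyRange 0 n, so 0 ≤ idx.
-- The pyGetD default (0,0) is never used: 0 ≤ idx < n = len(ingredient).
def solution (ingredient : List (Int × Int)) (k : Int) (s : Int) : Int :=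
  let n := ingredient.length
  (PySem.List.pyRange 1 ((1:Int) <<< n) 1).foldl (fun answer num =>
    let p := (PySem.List.pyRange 0 (n : Int) 1).foldl
      (fun (p : Int × Int) idx =>
        if PySem.Int.band num ((1:Int) <<< idx.toNat) ≠ 0 then
          (p.1 + (PySem.List.pyGetD ingredient idx ((0:Int),(0:Int))).1,
           p.2 + (PySem.List.pyGetD ingredient idx ((0:Int),(0:Int))).2)
        else p) ((0:Int), (0:Int))
    if p.1 ≤ k ∧ p.2 ≥ s then answer + 1 else answer) 0

-- ===== PORT B =====
-- Literal port of Source B: build the doubling list of subset sums, count the good pairs,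
-- subtract the empty subset.
def solution_alt (ingredient : List (Int × Int)) (k : Int) (s : Int) : Int :=
  let sums := ingredient.foldl
    (fun acc e => acc ++ acc.map (fun t => (t.1 + e.1, t.2 + e.2)))
    [((0:Int), (0:Int))]
  let good := sums.foldl (fun a t => if t.1 ≤ k ∧ t.2 ≥ s then a + 1 else a) (0:Int)
  good - (if (0:Int) ≤ k ∧ (0:Int) ≥ s then 1 else 0)

-- ===== PRECONDITION & SPEC =====
def Spec_solution (ingredient : List (Int × Int)) (k : Int) (s : Int) (out : Int) : Prop := out = solution_alt ingredient k s
instance (ingredient : List (Int × Int)) (k : Int) (s : Int) (out : Int) : Decidable (Spec_solution ingredient k s out) := by unfold Spec_solution; infer_instance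

-- ===== CLAIM (what is proved, stated in full; the proofs are below) =====
def Claim_equal_solution : Prop := ∀ (ingredient : List (Int × Int)) (k : Int) (s : Int), Dom_solution ingredient k s → Spec_solution ingredient k s (solution ingredient k s)

-- ===== LEMMAS AND PROOFS =====

-- A's inner loop as a function of the mask.
def pvInner (l : List (Int × Int)) (num : Int) : Int × Int :=
  (PySem.List.pyRange 0 (l.length : Int) 1).foldl
    (fun (p : Int × Int) idx =>
      if PySem.Int.band num ((1:Int) <<< idx.toNat) ≠ 0 then
        (p.1 + (PySem.List.pyGetD l idx ((0:Int),(0:Int))).1,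
         p.2 + (PySem.List.pyGetD l idx ((0:Int),(0:Int))).2)
      else p) ((0:Int), (0:Int))

-- The same loop over a Nat mask with testBit.
def pvInnerN (l : List (Int × Int)) (m : Nat) : Int × Int :=
  (List.range l.length).foldl
    (fun (p : Int × Int) j =>
      if m.testBit j then
        (p.1 + (l.getD j ((0:Int),(0:Int))).1, p.2 + (l.getD j ((0:Int),(0:Int))).2)
      else p) ((0:Int), (0:Int))

-- Canonical recursive subset count: subsets S of l with t + sum S inside the box.
def pvCnt (k s : Int) : List (Int × Int) → Int × Int → Int
  | [], t => if t.1 ≤ k ∧ t.2 ≥ s then 1 else 0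
  | e :: l, t => pvCnt k s l t + pvCnt k s l (t.1 + e.1, t.2 + e.2)

lemma pvBit (m i : Nat) : (PySem.Int.band (m : Int) ((1:Int) <<< (i : Int)) ≠ 0) ↔ m.testBit i := by
  rw [Int.one_shiftLeft, PySem.Int.band_natCast, Nat.and_two_pow]
  cases h : m.testBit i <;> simp

lemma pvInner_eq (l : List (Int × Int)) (m : Nat) : pvInner l (m : Int) = pvInnerN l m := by
  unfold pvInner pvInnerN
  rw [PySem.List.pyRange_one, List.foldl_map]
  simp only [sub_zero, Int.toNat_natCast, zero_add]
  apply PySem.List.foldl_congr_mem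
  intro p j hj
  rw [PySem.List.pyGetD_natCast]
  by_cases h : m.testBit j
  · rw [if_pos ((pvBit m j).mpr h), if_pos h]
  · rw [if_neg (fun hc => h ((pvBit m j).mp hc)), if_neg h]

lemma pvInnerN_zero (l : List (Int × Int)) : pvInnerN l 0 = ((0:Int), (0:Int)) := by
  unfold pvInnerN
  generalize List.range l.length = r
  induction r with
  | nil => rfl
  | cons j r ih =>
      rw [List.foldl_cons, if_neg (by simp)]
      exact ih

lemma pvInnerN_low (l : List (Int × Int)) (x : Int × Int) (m : Nat) (h : m < 2 ^ l.length) :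
    pvInnerN (l ++ [x]) m = pvInnerN l m := by
  unfold pvInnerN
  rw [List.length_append, List.length_singleton, List.range_succ, List.foldl_append]
  have hinner :
      List.foldl (fun (p : Int × Int) j => if m.testBit j then
          (p.1 + ((l ++ [x]).getD j ((0:Int),(0:Int))).1, p.2 + ((l ++ [x]).getD j ((0:Int),(0:Int))).2)
        else p) ((0:Int),(0:Int)) (List.range l.length)
      = List.foldl (fun (p : Int × Int) j => if m.testBit j then
          (p.1 + (l.getD j ((0:Int),(0:Int))).1, p.2 + (l.getD j ((0:Int),(0:Int))).2)
        else p) ((0:Int),(0:Int)) (List.range l.length) := by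
    apply PySem.List.foldl_congr_mem
    intro p j hj
    rw [List.mem_range] at hj
    simp [List.getD_eq_getElem?_getD, List.getElem?_append_left hj]
  rw [hinner]
  simp [Nat.testBit_lt_two_pow h]

lemma pvInnerN_high (l : List (Int × Int)) (x : Int × Int) (m : Nat) (h : m < 2 ^ l.length) :
    pvInnerN (l ++ [x]) (2 ^ l.length + m)
      = ((pvInnerN l m).1 + x.1, (pvInnerN l m).2 + x.2) := by
  unfold pvInnerN
  rw [List.length_append, List.length_singleton, List.range_succ, List.foldl_append]
  have hinner :
      List.foldl (fun (p : Int × Int) j => if (2 ^ l.length + m).testBit j then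
          (p.1 + ((l ++ [x]).getD j ((0:Int),(0:Int))).1, p.2 + ((l ++ [x]).getD j ((0:Int),(0:Int))).2)
        else p) ((0:Int),(0:Int)) (List.range l.length)
      = List.foldl (fun (p : Int × Int) j => if m.testBit j then
          (p.1 + (l.getD j ((0:Int),(0:Int))).1, p.2 + (l.getD j ((0:Int),(0:Int))).2)
        else p) ((0:Int),(0:Int)) (List.range l.length) := by
    apply PySem.List.foldl_congr_mem
    intro p j hj
    rw [List.mem_range] at hj
    rw [Nat.testBit_two_pow_add_gt hj]
    simp [List.getD_eq_getElem?_getD, List.getElem?_append_left hj]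
  rw [hinner]
  have hbit : (2 ^ l.length + m).testBit l.length = true := by
    rw [Nat.testBit_two_pow_add_eq, Nat.testBit_lt_two_pow h]; rfl
  have hget : (l ++ [x]).getD l.length ((0:Int),(0:Int)) = x := by
    simp [List.getD_eq_getElem?_getD]
  simp [hbit, List.getD_eq_getElem?_getD]

lemma pvCnt_concat (k s : Int) (l : List (Int × Int)) (x t : Int × Int) :
    pvCnt k s (l ++ [x]) t = pvCnt k s l t + pvCnt k s l (t.1 + x.1, t.2 + x.2) := by
  induction l generalizing t with
  | nil => simp [pvCnt]
  | cons e l ih =>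
      simp only [List.cons_append, pvCnt, ih]
      have h1 : t.1 + e.1 + x.1 = t.1 + x.1 + e.1 := by ring
      have h2 : t.2 + e.2 + x.2 = t.2 + x.2 + e.2 := by ring
      rw [h1, h2]; ring

-- A-side characterisation: sum over all 2^n masks of the box test at offset t.
lemma pvSumA (k s : Int) (l : List (Int × Int)) (t : Int × Int) :
    ((List.range (2 ^ l.length)).map (fun m =>
        if t.1 + (pvInnerN l m).1 ≤ k ∧ t.2 + (pvInnerN l m).2 ≥ s then (1:Int) else 0)).sum
      = pvCnt k s l t := by
  induction l using List.reverseRecOn generalizing t with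
  | nil => simp [pvInnerN, pvCnt]
  | append_singleton l x ih =>
      rw [List.length_append, List.length_singleton, pow_succ, mul_two, List.range_add,
        List.map_append, List.sum_append, List.map_map]
      have e1 : ((List.range (2 ^ l.length)).map (fun m =>
          if t.1 + (pvInnerN (l ++ [x]) m).1 ≤ k ∧ t.2 + (pvInnerN (l ++ [x]) m).2 ≥ s then (1:Int) else 0)).sum
          = ((List.range (2 ^ l.length)).map (fun m =>
          if t.1 + (pvInnerN l m).1 ≤ k ∧ t.2 + (pvInnerN l m).2 ≥ s then (1:Int) else 0)).sum := by
        apply congrArg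
        apply List.map_congr_left
        intro m hm
        rw [List.mem_range] at hm
        rw [pvInnerN_low l x m hm]
      have e2 : ((List.range (2 ^ l.length)).map ((fun m =>
          if t.1 + (pvInnerN (l ++ [x]) m).1 ≤ k ∧ t.2 + (pvInnerN (l ++ [x]) m).2 ≥ s then (1:Int) else 0)
            ∘ (fun m => 2 ^ l.length + m))).sum
          = ((List.range (2 ^ l.length)).map (fun m =>
          if (t.1 + x.1) + (pvInnerN l m).1 ≤ k ∧ (t.2 + x.2) + (pvInnerN l m).2 ≥ s then (1:Int) else 0)).sum := by
        apply congrArg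
        apply List.map_congr_left
        intro m hm
        rw [List.mem_range] at hm
        simp only [Function.comp_apply, pvInnerN_high l x m hm]
        apply if_congr _ rfl rfl
        constructor
        · rintro ⟨h1, h2⟩; exact ⟨by linarith, by linarith⟩
        · rintro ⟨h1, h2⟩; exact ⟨by linarith, by linarith⟩
      rw [e1, e2, ih t, ih (t.1 + x.1, t.2 + x.2), pvCnt_concat]

-- counting fold = 0/1 sum
lemma pvFoldCount {α : Type} (p : α → Prop) [DecidablePred p] (l : List α) (a : Int) :
    l.foldl (fun acc x => if p x then acc + 1 else acc) a
      = a + (l.map (fun x => if p x then (1:Int) else 0)).sum := by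
  induction l generalizing a with
  | nil => simp
  | cons x l ih => simp only [List.foldl_cons, List.map_cons, List.sum_cons, ih]; split_ifs <;> ring

-- A as the canonical count minus the empty subset.
lemma pvSolutionA (ingredient : List (Int × Int)) (k s : Int) :
    solution ingredient k s
      = pvCnt k s ingredient ((0:Int),(0:Int)) - (if (0:Int) ≤ k ∧ (0:Int) ≥ s then 1 else 0) := by
  have hpow : (1:Int) <<< ingredient.length = ((2 ^ ingredient.length : Nat) : Int) := by
    rw [Int.shiftLeft_eq]; push_cast; ring
  have hA : solution ingredient k s
      = ((PySem.List.pyRange 1 ((2 ^ ingredient.length : Nat) : Int) 1).map (fun num =>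
          if (pvInner ingredient num).1 ≤ k ∧ (pvInner ingredient num).2 ≥ s then (1:Int) else 0)).sum := by
    simp only [solution]
    rw [hpow]
    exact (pvFoldCount (fun num => (pvInner ingredient num).1 ≤ k ∧ (pvInner ingredient num).2 ≥ s)
      (PySem.List.pyRange 1 ((2 ^ ingredient.length : Nat) : Int) 1) 0).trans (zero_add _)
  have hfull :
      ((PySem.List.pyRange 0 ((2 ^ ingredient.length : Nat) : Int) 1).map (fun num =>
          if (pvInner ingredient num).1 ≤ k ∧ (pvInner ingredient num).2 ≥ s then (1:Int) else 0)).sum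
        = pvCnt k s ingredient ((0:Int),(0:Int)) := by
    rw [PySem.List.pyRange_one, List.map_map]
    have hn : ((((2 ^ ingredient.length : Nat) : Int)) - 0).toNat = 2 ^ ingredient.length := by
      rw [sub_zero, Int.toNat_natCast]
    rw [hn, ← pvSumA k s ingredient ((0:Int),(0:Int))]
    apply congrArg
    apply List.map_congr_left
    intro m hm
    simp [pvInner_eq]
  have hsplit : PySem.List.pyRange 0 ((2 ^ ingredient.length : Nat) : Int) 1
      = 0 :: PySem.List.pyRange 1 ((2 ^ ingredient.length : Nat) : Int) 1 := by
    have hpos : (0:Int) < ((2 ^ ingredient.length : Nat) : Int) := by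
      exact_mod_cast Nat.two_pow_pos ingredient.length
    simpa using PySem.List.pyRange_one_cons hpos
  have hz : pvInner ingredient (0 : Int) = ((0:Int),(0:Int)) := by
    have h0 := pvInner_eq ingredient 0
    simpa using h0.trans (pvInnerN_zero ingredient)
  rw [hsplit] at hfull
  simp only [List.map_cons, List.sum_cons, hz] at hfull
  rw [hA]
  split_ifs at hfull ⊢ with h1 <;> omega

-- B-side characterisation.
lemma pvSumB (k s : Int) (l : List (Int × Int)) (acc : List (Int × Int)) :
    ((l.foldl (fun acc e => acc ++ acc.map (fun t => (t.1 + e.1, t.2 + e.2))) acc).map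
        (fun t => if t.1 ≤ k ∧ t.2 ≥ s then (1:Int) else 0)).sum
      = (acc.map (pvCnt k s l)).sum := by
  induction l generalizing acc with
  | nil => simp [pvCnt]
  | cons e l ih =>
      rw [List.foldl_cons, ih, List.map_append, List.sum_append, List.map_map]
      have hadd : ∀ f g : Int × Int → Int,
          (acc.map f).sum + (acc.map g).sum = (acc.map (fun t => f t + g t)).sum := by
        intro f g
        induction acc with
        | nil => simp
        | cons a acc ihh => simp only [List.map_cons, List.sum_cons, ← ihh]; ring
      rw [hadd]
      apply congrArg
      apply List.map_congr_left
      intro t _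
      simp [pvCnt, Function.comp]

lemma pvSolutionB (ingredient : List (Int × Int)) (k s : Int) :
    solution_alt ingredient k s
      = pvCnt k s ingredient ((0:Int),(0:Int)) - (if (0:Int) ≤ k ∧ (0:Int) ≥ s then 1 else 0) := by
  simp only [solution_alt]
  have h1 := (pvFoldCount (fun t : Int × Int => t.1 ≤ k ∧ t.2 ≥ s)
    (ingredient.foldl (fun acc e => acc ++ acc.map (fun t => (t.1 + e.1, t.2 + e.2)))
      [((0:Int),(0:Int))]) 0).trans (zero_add _)
  rw [h1, pvSumB k s ingredient [((0:Int),(0:Int))]]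
  simp

-- ===== VERDICT (by name: the statement is the Claim_ definition above) =====
theorem solution_spec : Claim_equal_solution := by
  intro ingredient k s _
  unfold Spec_solution
  rw [pvSolutionA, pvSolutionB]
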